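-- pv_equiv track=rewrite | github.com/ray12514/clusterinspector | src/clusterinspector/profile/probes/fabric.py | _primary_fabric
-- ===== SOURCE A (Python) =====
-- from typing import Dict, List, Tuple
--
-- def _primary_fabric(nics: List[Dict[str, str]]) -> str:
--     fabrics = [nic.get("fabric", "unknown") for nic in nics if nic.get("fabric")]
--     unique = sorted({fabric for fabric in fabrics if fabric and fabric != "unknown"})
--     if not unique:
--         return "unknown"
--     if len(unique) == 1:
--         return unique[0]
--     return "mixed"
-- ===== SOURCE B (Python) =====
-- def _primary_fabric(nics):
--     found = None
--     for nic in nics: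
--         f = nic.get("fabric")
--         if not f or f == "unknown":
--             continue
--         if found is None:
--             found = f
--         elif f != found:
--             return "mixed"
--     return found if found is not None else "unknown"
-- ===== Notes on version B (the rewrite author's own statement) =====
-- stated objective: simpler
-- what changed: Replaced the list/set/sorted pipeline with a single early-exit pass keeping one scalar 'found' and returning 'mixed' on the first conflicting fabric.
import Mathlib
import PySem

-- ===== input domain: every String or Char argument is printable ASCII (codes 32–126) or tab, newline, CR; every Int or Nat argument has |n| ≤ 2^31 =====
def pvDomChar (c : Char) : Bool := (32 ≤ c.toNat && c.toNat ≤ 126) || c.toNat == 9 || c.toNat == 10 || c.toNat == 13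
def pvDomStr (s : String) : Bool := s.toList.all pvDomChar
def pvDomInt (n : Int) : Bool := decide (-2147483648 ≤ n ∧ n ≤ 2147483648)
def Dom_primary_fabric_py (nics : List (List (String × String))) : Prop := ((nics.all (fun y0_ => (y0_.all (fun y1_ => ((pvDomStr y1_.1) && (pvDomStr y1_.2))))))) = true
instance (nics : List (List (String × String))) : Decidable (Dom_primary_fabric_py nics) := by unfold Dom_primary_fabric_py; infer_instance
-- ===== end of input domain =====

-- B replaces A's list/set/sorted pipeline by one early-exit pass with a single scalar accumulator (simpler).

-- ===== PORT A =====
def primary_fabric_py (nics : List (List (String × String))) : String :=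
  -- fabrics = [nic.get("fabric", "unknown") for nic in nics if nic.get("fabric")]
  let fabrics := (nics.filter (fun nic => ((PySem.Dict.mk nic).get? "fabric").getD "" != "")).map
      (fun nic => (PySem.Dict.mk nic).getD "fabric" "unknown")
  -- unique = sorted({fabric for fabric in fabrics if fabric and fabric != "unknown"})
  let unique := PySem.List.sorted
      (PySem.Set.ofList (fabrics.filter (fun f => f != "" && f != "unknown"))) (fun x => x) false
  match unique with
  | [] => "unknown"          -- if not unique: return "unknown"
  | [u] => u                 -- if len(unique) == 1: return unique[0]
  | _ => "mixed"             -- return "mixed"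

-- ===== PORT B =====
def pfAltGo : List (List (String × String)) → Option String → String
  | [], none => "unknown"
  | [], some g => g
  | nic :: rest, found =>
      let f := ((PySem.Dict.mk nic).get? "fabric").getD ""
      if f == "" || f == "unknown" then pfAltGo rest found
      else match found with
        | none => pfAltGo rest (some f)
        | some g => if f == g then pfAltGo rest found else "mixed"

def primary_fabric_py_alt (nics : List (List (String × String))) : String :=
  pfAltGo nics none

-- ===== PRECONDITION & SPEC =====
def Spec_primary_fabric_py (nics : List (List (String × String))) (out : String) : Prop := out = primary_fabric_py_alt nics
instance (nics : List (List (String × String))) (out : String) : Decidable (Spec_primary_fabric_py nics out) := by unfold Spec_primary_fabric_py; infer_instance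

-- ===== CLAIM (what is proved, stated in full; the proofs are below) =====
def Claim_equal_primary_fabric_py : Prop := ∀ (nics : List (List (String × String))), Dom_primary_fabric_py nics → Spec_primary_fabric_py nics (primary_fabric_py nics)

-- ===== LEMMAS AND PROOFS =====

-- the list of "valid" fabric values (truthy and not "unknown"), in order
def pvV (nics : List (List (String × String))) : List String :=
  (nics.map (fun nic => ((PySem.Dict.mk nic).get? "fabric").getD "")).filter
    (fun f => f != "" && f != "unknown")

-- reference classification of the valid-fabric list
def pvRef : List String → String
  | [] => "unknown"
  | v :: rest => if rest.all (fun x => x == v) then v else "mixed"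

theorem pvV_cons (nic : List (String × String)) (rest : List (List (String × String))) :
    pvV (nic :: rest) =
      (if (((PySem.Dict.mk nic).get? "fabric").getD "" != "" &&
           ((PySem.Dict.mk nic).get? "fabric").getD "" != "unknown")
       then ((PySem.Dict.mk nic).get? "fabric").getD "" :: pvV rest else pvV rest) := by
  simp only [pvV, List.map_cons, List.filter_cons]

theorem pfAltGo_eq_ref (nics : List (List (String × String))) :
    ∀ found : Option String,
      pfAltGo nics found =
        (match found with
         | none => pvRef (pvV nics)
         | some g => pvRef (g :: pvV nics)) := by
  induction nics with
  | nil =>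
      intro found
      cases found <;> rfl
  | cons nic rest ih =>
      intro found
      rw [pvV_cons]
      set f := ((PySem.Dict.mk nic).get? "fabric").getD "" with hf
      by_cases hskip : (f == "" || f == "unknown") = true
      · have hc : (f != "" && f != "unknown") = false := by
          cases Bool.or_eq_true_iff.mp hskip <;> simp_all
        cases found <;> simp [pfAltGo, ← hf, hskip, hc, ih]
      · have hc : (f != "" && f != "unknown") = true := by
          simp only [Bool.or_eq_true_iff, not_or] at hskip
          simp_all
        cases found with
        | none => simp [pfAltGo, ← hf, hskip, hc, ih]
        | some g =>
            by_cases hg : (f == g) = true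
            · have : f = g := by simpa using hg
              subst this
              simp [pfAltGo, ← hf, hskip, hc, ih, pvRef]
            · have hne : ¬ (f = g) := by simpa using hg
              simp [pfAltGo, ← hf, hskip, hg, hc, pvRef]

theorem pvAlt_eq_ref (nics : List (List (String × String))) :
    primary_fabric_py_alt nics = pvRef (pvV nics) := by
  simpa using pfAltGo_eq_ref nics none

-- A's combined filter of the comprehension equals pvV
theorem pvFabrics_filter_eq (nics : List (List (String × String))) :
    ((nics.filter (fun nic => ((PySem.Dict.mk nic).get? "fabric").getD "" != "")).map
        (fun nic => (PySem.Dict.mk nic).getD "fabric" "unknown")).filter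
      (fun f => f != "" && f != "unknown") = pvV nics := by
  induction nics with
  | nil => simp [pvV]
  | cons nic rest ih =>
      rw [pvV_cons]
      by_cases h0 : (((PySem.Dict.mk nic).get? "fabric").getD "" != "") = true
      · have hval : (PySem.Dict.mk nic).getD "fabric" "unknown"
            = ((PySem.Dict.mk nic).get? "fabric").getD "" := by
          simp only [PySem.Dict.getD]
          cases hg : (PySem.Dict.mk nic).get? "fabric" with
          | none => simp [hg] at h0
          | some v => rfl
        by_cases h1 : (((PySem.Dict.mk nic).get? "fabric").getD "" != "unknown") = true
        · simp [h0, h1, hval, ih]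
        · simp [h0, h1, hval, ih]
      · have h1 : (((PySem.Dict.mk nic).get? "fabric").getD "" != "" &&
            ((PySem.Dict.mk nic).get? "fabric").getD "" != "unknown") = false := by
          simp_all
        simp [h0, ih]

theorem pvOfList_all_eq {v : String} : ∀ (rest : List String),
    rest.all (fun x => x == v) = true → PySem.Set.ofList (v :: rest) = [v] := by
  intro rest hall
  have : ∀ (s : List String), s.all (fun x => x == v) = true →
      List.foldl PySem.Set.add [v] s = [v] := by
    intro s
    induction s with
    | nil => intro _; rfl
    | cons x t ih =>
        intro h
        simp only [List.all_cons, Bool.and_eq_true, beq_iff_eq] at h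
        have hx : x = v := h.1
        have hadd : PySem.Set.add [v] x = [v] := by
          simp [PySem.Set.add, PySem.Set.contains, hx]
        simp only [List.foldl_cons, hadd]
        exact ih h.2
  have h2 : PySem.Set.ofList (v :: rest) = List.foldl PySem.Set.add [v] rest := by
    rw [PySem.Set.ofList_eq_foldl]
    simp [List.foldl_cons, PySem.Set.add, PySem.Set.contains]
  rw [h2]
  exact this rest hall

theorem pvTwo_le_length {l : List String} {a b : String}
    (ha : a ∈ l) (hb : b ∈ l) (hne : a ≠ b) : 2 ≤ l.length := by
  match l with
  | [] => simp at ha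
  | [x] =>
      simp only [List.mem_singleton] at ha hb
      exact absurd (ha.trans hb.symm) hne
  | x :: y :: t => simp

theorem pvA_expand (nics : List (List (String × String))) :
    primary_fabric_py nics =
      (match PySem.List.sorted (PySem.Set.ofList (pvV nics)) (fun x => x) false with
       | [] => "unknown"
       | [u] => u
       | _ => "mixed") := by
  show (match PySem.List.sorted
      (PySem.Set.ofList
        (((nics.filter (fun nic => ((PySem.Dict.mk nic).get? "fabric").getD "" != "")).map
            (fun nic => (PySem.Dict.mk nic).getD "fabric" "unknown")).filter
          (fun f => f != "" && f != "unknown"))) (fun x => x) false with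
     | [] => "unknown"
     | [u] => u
     | _ => "mixed") = _
  rw [pvFabrics_filter_eq]

theorem pvA_eq_ref (nics : List (List (String × String))) :
    primary_fabric_py nics = pvRef (pvV nics) := by
  rw [pvA_expand]
  cases hv : pvV nics with
  | nil =>
      rw [show PySem.Set.ofList ([] : List String) = [] from rfl,
          show PySem.List.sorted ([] : List String) (fun x => x) false = [] from rfl]
      rfl
  | cons v rest =>
      by_cases hall : rest.all (fun x => x == v) = true
      · rw [pvOfList_all_eq rest hall]
        rw [show PySem.List.sorted [v] (fun x => x) false = [v] from rfl]
        simp [pvRef, hall]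
      · -- some element of rest differs from v: the set has at least two elements
        have ⟨w, hw, hwne⟩ : ∃ w ∈ rest, w ≠ v := by
          simp only [List.all_eq_true, beq_iff_eq] at hall
          push Not at hall
          exact hall
        have hvm : v ∈ PySem.Set.ofList (v :: rest) := by
          rw [PySem.Set.mem_ofList]; simp
        have hwm : w ∈ PySem.Set.ofList (v :: rest) := by
          rw [PySem.Set.mem_ofList]; simp [hw]
        have hlen : 2 ≤ (PySem.List.sorted (PySem.Set.ofList (v :: rest)) (fun x => x) false).length := by
          rw [PySem.List.length_sorted]
          exact pvTwo_le_length hvm hwm (Ne.symm hwne)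
        cases hs : PySem.List.sorted (PySem.Set.ofList (v :: rest)) (fun x => x) false with
        | nil => rw [hs] at hlen; simp at hlen
        | cons a t =>
            cases t with
            | nil => rw [hs] at hlen; simp at hlen
            | cons b t' => simp [pvRef, hall]

-- ===== VERDICT (by name: the statement is the Claim_ definition above) =====
theorem primary_fabric_py_spec : Claim_equal_primary_fabric_py := by
  intro nics _
  unfold Spec_primary_fabric_py
  rw [pvA_eq_ref, pvAlt_eq_ref]
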